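-- pv_equiv track=rewrite | github.com/greenstar1151/Baekjoon | 11057_오르막 수/11057_오르막 수_250904.py | solution
-- ===== SOURCE A (Python) =====
-- MODULO = 10007
--
-- def solution(N: int):
--     # DP[n][x]: x로 시작하는 n자리 오르막 수
--     DP = [[0] * 10 for _ in range(N + 1)]
--     # 1자리 오르막 수
--     for i in range(10):
--         DP[1][i] = 1
--
--     for i in range(2, N + 1):
--         for j in range(9, -1, -1):
--             DP[i][j] = sum(DP[i - 1][j:]) % MODULO
--     return sum(DP[N]) % MODULO
-- ===== SOURCE B (Python) =====
-- MODULO = 10007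
--
-- def solution(N: int):
--     # rolling single row + running suffix accumulator (no 2-D table, no slice rescans)
--     row = [1] * 10
--     for _ in range(2, N + 1):
--         new = [0] * 10
--         running = 0
--         for j in range(9, -1, -1):
--             running = (running + row[j]) % MODULO
--             new[j] = running
--         row = new
--     return sum(row) % MODULO
-- ===== Notes on version B (the rewrite author's own statement) =====
-- stated objective: faster
-- what changed: Replaced the full (N+1)x10 table whose every cell re-sums a suffix slice of the previous row with a rolling single row updated by one running suffix-sum accumulator per pass.
import Mathlib
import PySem

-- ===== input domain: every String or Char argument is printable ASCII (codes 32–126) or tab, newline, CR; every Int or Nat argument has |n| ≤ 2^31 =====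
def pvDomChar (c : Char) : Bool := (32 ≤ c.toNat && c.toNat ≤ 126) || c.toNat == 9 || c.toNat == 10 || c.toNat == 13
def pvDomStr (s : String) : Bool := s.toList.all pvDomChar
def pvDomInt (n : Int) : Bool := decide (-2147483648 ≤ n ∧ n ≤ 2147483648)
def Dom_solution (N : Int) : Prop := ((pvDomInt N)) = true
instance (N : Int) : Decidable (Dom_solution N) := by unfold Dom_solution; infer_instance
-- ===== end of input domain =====

-- B replaces A's (N+1)x10 table whose cells re-sum suffix slices of the previous row
-- with a rolling single row updated by one running suffix-sum accumulator (objective: faster).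


def pvMOD : Int := 10007

-- ===== PORT A =====
-- The outer table DP is a Python list of rows; it is represented as an Array (List Int) so the
-- port evaluates fast. Table indices i, i-1, 1, N are nonnegative and in range on every input
-- Pre_ admits (1 ≤ N), where Array.getD/osetIfInBounds are exact for Python's DP[...] read/write;
-- rows and row indexing/slicing use the PySem list primitives.

-- 'for i in range(10): DP[1][i] = 1'
def pvInitA (t : Array (List Int)) : Array (List Int) :=
  (PySem.List.pyRange 0 10 1).foldl
    (fun t i => t.setIfInBounds 1 (PySem.List.pySetD (t.getD 1 []) i 1)) t

-- one iteration of the outer loop: 'for j in range(9,-1,-1): DP[i][j] = sum(DP[i-1][j:]) % MODULO'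
def pvStepA (t : Array (List Int)) (i : Int) : Array (List Int) :=
  (PySem.List.pyRange 9 (-1) (-1)).foldl
    (fun t j => t.setIfInBounds i.toNat
      (PySem.List.pySetD (t.getD i.toNat [])
        j (PySem.Int.mod (PySem.List.slice (t.getD (i - 1).toNat []) (some j) none).sum pvMOD)))
    t

def solution (N : Int) : Int :=
  let dp := Array.replicate (N + 1).toNat (List.replicate 10 (0 : Int))
  let dp := pvInitA dp
  let dp := (PySem.List.pyRange 2 (N + 1) 1).foldl pvStepA dp
  PySem.Int.mod (dp.getD N.toNat []).sum pvMOD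

-- ===== PORT B =====
-- one pass of Source B's inner loop: running suffix sums into a fresh row
def pvRowB (row : List Int) : List Int :=
  ((PySem.List.pyRange 9 (-1) (-1)).foldl
    (fun s j =>
      let r := PySem.Int.mod (s.2 + PySem.List.pyGetD row j 0) pvMOD
      (PySem.List.pySetD s.1 j r, r))
    (List.replicate 10 (0 : Int), (0 : Int))).1

def solution_alt (N : Int) : Int :=
  let row := List.replicate 10 (1 : Int)
  let row := (PySem.List.pyRange 2 (N + 1) 1).foldl (fun r _ => pvRowB r) row
  PySem.Int.mod row.sum pvMOD

-- ===== PRECONDITION & SPEC =====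
-- Pre_ excludes N < 1, where the Python A raises IndexError (DP[1] does not exist).
def Pre_solution (N : Int) : Prop := 1 ≤ N
instance (N : Int) : Decidable (Pre_solution N) := by unfold Pre_solution; infer_instance
def pvWitness_solution : Int := 3

def Spec_solution (N : Int) (out : Int) : Prop := out = solution_alt N
instance (N : Int) (out : Int) : Decidable (Spec_solution N out) := by unfold Spec_solution; infer_instance

-- ===== CLAIM (what is proved, stated in full; the proofs are below) =====
def Claim_equal_solution : Prop := ∀ (N : Int), Dom_solution N → Pre_solution N → Spec_solution N (solution N)

-- ===== LEMMAS AND PROOFS =====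

-- list mirror of the A-side table (the proofs run on List, the port's Array is bridged via toList)
def pvInitAL (t : List (List Int)) : List (List Int) :=
  (PySem.List.pyRange 0 10 1).foldl
    (fun t i => t.set 1 (PySem.List.pySetD (t.getD 1 []) i 1)) t

def pvStepAL (t : List (List Int)) (i : Int) : List (List Int) :=
  (PySem.List.pyRange 9 (-1) (-1)).foldl
    (fun t j => t.set i.toNat
      (PySem.List.pySetD (t.getD i.toNat [])
        j (PySem.Int.mod (PySem.List.slice (t.getD (i - 1).toNat []) (some j) none).sum pvMOD)))
    t

theorem pv_agetD (a : Array (List Int)) (i : Nat) :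
    a.getD i [] = a.toList.getD i [] := by
  simp [Array.getD, List.getD]
  split <;> simp_all

theorem pv_initA_toList (t : Array (List Int)) :
    (pvInitA t).toList = pvInitAL t.toList := by
  unfold pvInitA pvInitAL
  generalize PySem.List.pyRange 0 10 1 = js
  induction js generalizing t with
  | nil => rfl
  | cons j rest ih =>
    simp only [List.foldl_cons]
    rw [← Array.toList_setIfInBounds, ← pv_agetD, ih]

theorem pv_stepA_toList (t : Array (List Int)) (i : Int) :
    (pvStepA t i).toList = pvStepAL t.toList i := by
  unfold pvStepA pvStepAL
  generalize PySem.List.pyRange 9 (-1) (-1) = js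
  induction js generalizing t with
  | nil => rfl
  | cons j rest ih =>
    simp only [List.foldl_cons]
    rw [← Array.toList_setIfInBounds, ← pv_agetD, ← pv_agetD, ih]

theorem pv_foldA_toList (js : List Int) (t : Array (List Int)) :
    (js.foldl pvStepA t).toList = js.foldl pvStepAL t.toList := by
  induction js generalizing t with
  | nil => rfl
  | cons j rest ih => rw [List.foldl_cons, List.foldl_cons, ih, pv_stepA_toList]

theorem pv_getD_set_self (t : List (List Int)) (i : Nat) (v : List Int) (h : i < t.length) :
    (t.set i v).getD i [] = v := by
  simp [List.getD, h]
theorem pv_getD_set_ne (t : List (List Int)) (i j : Nat) (v : List Int) (h : i ≠ j) :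
    (t.set i v).getD j [] = t.getD j [] := by
  simp [List.getD, List.getElem?_set_ne h]
theorem pv_list10 (l : List Int) (h : l.length = 10) :
    ∃ a0 a1 a2 a3 a4 a5 a6 a7 a8 a9, l = [a0,a1,a2,a3,a4,a5,a6,a7,a8,a9] := by
  rcases l with _|⟨a0,_|⟨a1,_|⟨a2,_|⟨a3,_|⟨a4,_|⟨a5,_|⟨a6,_|⟨a7,_|⟨a8,_|⟨a9,_|⟨a10,l⟩⟩⟩⟩⟩⟩⟩⟩⟩⟩⟩ <;> simp_all

theorem pv_set_getD_self (t : List (List Int)) (n : Nat) (h : n < t.length) :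
    t.set n (t.getD n []) = t := by
  rw [List.getD_eq_getElem _ _ h]; exact List.set_getElem_self h

theorem pv_foldA_collapse (v' : List Int → Int → Int) (js : List Int) (n p : Nat) (hnp : n ≠ p)
    (t : List (List Int)) (hn : n < t.length) :
    js.foldl (fun t j => t.set n
        (PySem.List.pySetD (t.getD n []) j (v' (t.getD p []) j))) t
    = t.set n (js.foldl (fun row j => PySem.List.pySetD row j (v' (t.getD p []) j)) (t.getD n [])) := by
  induction js generalizing t with
  | nil => rw [List.foldl_nil, List.foldl_nil, pv_set_getD_self t n hn]
  | cons j rest ih =>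
    rw [List.foldl_cons, List.foldl_cons, ih _ (by simpa using hn)]
    rw [pv_getD_set_ne _ _ _ _ hnp, pv_getD_set_self _ _ _ hn, List.set_set]

set_option maxHeartbeats 1000000 in
theorem pv_stepA_eq (t : List (List Int)) (k : Nat) (hlen : k + 2 < t.length)
    (prev : List Int) (hplen : prev.length = 10)
    (hprev : t.getD (k+1) [] = prev) (hrow : t.getD (k+2) [] = List.replicate 10 0) :
    pvStepAL t (2 + (k : Int)) = t.set (k+2) (pvRowB prev) := by
  obtain ⟨a0,a1,a2,a3,a4,a5,a6,a7,a8,a9,rfl⟩ := pv_list10 prev hplen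
  have h2 : ((2 : Int) + (k : Int)).toNat = k + 2 := by omega
  have h1 : ((2 : Int) + (k : Int) - 1).toNat = k + 1 := by omega
  have hj : PySem.List.pyRange 9 (-1) (-1) = [9,8,7,6,5,4,3,2,1,0] := by decide
  unfold pvStepAL
  rw [hj]
  simp only [h2, h1]
  have hc := pv_foldA_collapse
      (fun row j => PySem.Int.mod (PySem.List.slice row (some j) none).sum pvMOD)
      [9,8,7,6,5,4,3,2,1,0] (k+2) (k+1) (by omega) t hlen
  beta_reduce at hc
  rw [hc, hprev, hrow]
  refine congrArg _ ?_
  have hm : ∀ a : Int, PySem.Int.mod a pvMOD = a % 10007 := fun a => by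
    rw [pvMOD, PySem.Int.mod_eq_emod_of_pos] ; norm_num
  simp [pvRowB, hj, PySem.List.pySetD, PySem.List.pySet?, PySem.List.pyGetD, PySem.List.slice, PySem.List.pyIdx?, hm]
  and_intros <;> omega

def pvIterB : Nat → List Int
  | 0 => List.replicate 10 1
  | k+1 => pvRowB (pvIterB k)

theorem pv_rowB_len (r : List Int) : (pvRowB r).length = 10 := by
  have hj : PySem.List.pyRange 9 (-1) (-1) = [9,8,7,6,5,4,3,2,1,0] := by decide
  simp [pvRowB, hj, PySem.List.pySetD, PySem.List.pySet?, PySem.List.pyIdx?]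

theorem pv_iterB_len (k : Nat) : (pvIterB k).length = 10 := by
  cases k with
  | zero => rfl
  | succ k => exact pv_rowB_len _

theorem pv_foldB (k : Nat) :
    (PySem.List.pyRange 2 (2 + (k : Int)) 1).foldl (fun r _ => pvRowB r) (List.replicate 10 1)
      = pvIterB k := by
  induction k with
  | zero => rw [show (2 + ((0:Nat) : Int)) = 2 by norm_num, PySem.List.pyRange_one_eq_nil (by omega)]; rfl
  | succ k ih =>
    rw [show (2 + ((k+1 : Nat) : Int)) = (2 + (k : Int)) + 1 by push_cast; ring,
        PySem.List.pyRange_one_succ_right (by omega), List.foldl_append, ih]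
    rfl

theorem pv_initAL (n : Nat) (h : 2 ≤ n) :
    pvInitAL (List.replicate n (List.replicate 10 (0:Int)))
      = (List.replicate n (List.replicate 10 (0:Int))).set 1 (List.replicate 10 1) := by
  obtain ⟨m, rfl⟩ : ∃ m, n = m + 2 := ⟨n - 2, by omega⟩
  have hr : PySem.List.pyRange 0 10 1 = [0,1,2,3,4,5,6,7,8,9] := by decide
  unfold pvInitAL
  rw [hr, show List.replicate (m+2) (List.replicate 10 (0:Int))
        = List.replicate 10 (0:Int) :: List.replicate 10 (0:Int) :: List.replicate m (List.replicate 10 (0:Int)) from rfl]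
  simp [PySem.List.pySetD, PySem.List.pySet?, PySem.List.pyIdx?, List.getD]

theorem pv_foldA (N : Int) (hN : 1 ≤ N) (k : Nat) (hk : (k : Int) + 1 ≤ N) :
    ((PySem.List.pyRange 2 (2 + (k : Int)) 1).foldl pvStepAL
        (pvInitAL (List.replicate (N+1).toNat (List.replicate 10 (0:Int))))).length = (N+1).toNat ∧
    ((PySem.List.pyRange 2 (2 + (k : Int)) 1).foldl pvStepAL
        (pvInitAL (List.replicate (N+1).toNat (List.replicate 10 (0:Int))))).getD (k+1) [] = pvIterB k ∧
    (∀ m : Nat, k + 1 < m → m < (N+1).toNat →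
      ((PySem.List.pyRange 2 (2 + (k : Int)) 1).foldl pvStepAL
        (pvInitAL (List.replicate (N+1).toNat (List.replicate 10 (0:Int))))).getD m [] = List.replicate 10 0) := by
  have hlen2 : 2 ≤ (N+1).toNat := by omega
  rw [pv_initAL _ hlen2]
  induction k with
  | zero =>
    rw [show (2 + ((0:Nat) : Int)) = 2 by norm_num, PySem.List.pyRange_one_eq_nil (by omega), List.foldl_nil]
    refine ⟨by simp, ?_, ?_⟩
    · exact pv_getD_set_self _ _ _ (by simp; omega)
    · intro m h1 h2
      rw [pv_getD_set_ne _ _ _ _ (by omega), List.getD_replicate _ (by simpa using h2)]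
  | succ k ih =>
    have hk' : (k : Int) + 1 ≤ N := by push_cast at hk ⊢; omega
    obtain ⟨ihlen, ihrow, ihrest⟩ := ih hk'
    rw [show (2 + ((k+1 : Nat) : Int)) = (2 + (k : Int)) + 1 by push_cast; ring,
        PySem.List.pyRange_one_succ_right (by omega), List.foldl_append, List.foldl_cons, List.foldl_nil]
    have hlt : k + 2 < (N+1).toNat := by omega
    rw [pv_stepA_eq _ k (lt_of_lt_of_eq hlt ihlen.symm) _ (pv_iterB_len k) ihrow (ihrest (k+2) (by omega) hlt)]
    refine ⟨by simpa only [List.length_set] using ihlen, ?_, ?_⟩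
    · rw [show k + 1 + 1 = k + 2 from rfl,
          pv_getD_set_self _ _ _ (lt_of_lt_of_eq hlt ihlen.symm)]
      rfl
    · intro m h1 h2
      rw [pv_getD_set_ne _ _ _ _ (by omega), ihrest m (by omega) h2]

-- ===== VERDICT (by name: the statement is the Claim_ definition above) =====
theorem solution_spec : Claim_equal_solution := by
  unfold Claim_equal_solution
  intro N _ hPre
  unfold Pre_solution at hPre
  unfold Spec_solution solution solution_alt
  dsimp only
  set k := (N - 1).toNat with hkdef
  have hkN : (k : Int) = N - 1 := by simp [hkdef]; omega
  rw [show PySem.List.pyRange 2 (N+1) 1 = PySem.List.pyRange 2 (2 + (k:Int)) 1 by rw [show N + 1 = 2 + (k:Int) by omega]]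
  obtain ⟨-, hrow, -⟩ := pv_foldA N hPre k (by omega)
  rw [pv_foldB k, pv_agetD, pv_foldA_toList, pv_initA_toList, Array.toList_replicate]
  rw [show N.toNat = k + 1 by omega, hrow]
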